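-- pv_equiv track=rewrite | github.com/Jorgro/ITGK | Øving 3/Dobbelløkker.py | primtall
-- ===== SOURCE A (Python) =====
-- def primtall(tall):
--     tallene = []
--     for i in range(2, tall):
--         if tall%i == 0:
--             for j in range(2, i):
--                 if i%j ==0:
--                     tallene.append(j)
--     return tallene
-- ===== SOURCE B (Python) =====
-- def primtall(tall):
--     # Build the proper divisors of tall once; each inner scan then runs over
--     # this ascending divisor list instead of the full range(2, i).
--     divs = [i for i in range(2, tall) if tall % i == 0]
--     out = []
--     for i in divs:
--         out.extend(j for j in divs if j < i and i % j == 0)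
--     return out
-- ===== Notes on version B (the rewrite author's own statement) =====
-- stated objective: alternative
-- what changed: B computes the proper-divisor list of tall in one range pass and then, for each divisor i, scans that short divisor list (j < i and i % j == 0) instead of A's inner scan over the whole range(2, i); intended to cut the inner-loop work (measured speedup varies with the divisor count of tall).
import Mathlib
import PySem

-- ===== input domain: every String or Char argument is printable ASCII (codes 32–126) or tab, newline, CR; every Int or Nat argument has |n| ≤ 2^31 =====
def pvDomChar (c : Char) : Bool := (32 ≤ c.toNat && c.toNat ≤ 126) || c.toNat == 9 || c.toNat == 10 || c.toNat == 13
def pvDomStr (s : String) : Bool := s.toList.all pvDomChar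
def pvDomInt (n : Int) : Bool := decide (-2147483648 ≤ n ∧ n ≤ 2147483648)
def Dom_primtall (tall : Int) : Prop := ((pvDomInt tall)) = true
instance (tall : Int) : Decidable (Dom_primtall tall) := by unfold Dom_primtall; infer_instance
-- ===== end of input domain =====

-- B builds the divisor list of tall once and the inner loops scan that list instead of range(2, i); objective: alternative.

-- ===== PORT A =====
def primtall (tall : Int) : List Int :=
  (PySem.List.pyRange 2 tall 1).foldl (fun tallene i =>
    if PySem.Int.mod tall i = 0 then
      (PySem.List.pyRange 2 i 1).foldl (fun t j =>
        if PySem.Int.mod i j = 0 then t ++ [j] else t) tallene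
    else tallene) []

-- ===== PORT B =====
def primtall_alt (tall : Int) : List Int :=
  let divs := (PySem.List.pyRange 2 tall 1).filter (fun i => decide (PySem.Int.mod tall i = 0))
  divs.foldl (fun out i =>
    out ++ divs.filter (fun j => decide (j < i ∧ PySem.Int.mod i j = 0))) []

-- ===== PRECONDITION & SPEC =====
def Spec_primtall (tall : Int) (out : List Int) : Prop := out = primtall_alt tall
instance (tall : Int) (out : List Int) : Decidable (Spec_primtall tall out) := by unfold Spec_primtall; infer_instance

-- ===== CLAIM (what is proved, stated in full; the proofs are below) =====
def Claim_equal_primtall : Prop := ∀ (tall : Int), Dom_primtall tall → Spec_primtall tall (primtall tall)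

-- ===== LEMMAS AND PROOFS =====

theorem pv_flatMap_ite (l : List Int) (p : Int → Prop) [DecidablePred p] (g : Int → List Int) :
    (l.flatMap (fun i => if p i then g i else [])) =
    (l.filter (fun i => decide (p i))).flatMap g := by
  induction l with
  | nil => rfl
  | cons x xs ih => by_cases h : p x <;> simp [h, ih]

-- For a divisor i of tall with 2 ≤ i < tall, the divisors of i in range(2, i)
-- are exactly the members of the divisor list of tall that are < i and divide i.
theorem pv_inner_eq (tall i : Int) (h2i : 2 ≤ i) (hit : i < tall)
    (hmod : PySem.Int.mod tall i = 0) :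
    (PySem.List.pyRange 2 i 1).filter (fun j => decide (PySem.Int.mod i j = 0)) =
    ((PySem.List.pyRange 2 tall 1).filter (fun i => decide (PySem.Int.mod tall i = 0))).filter
      (fun j => decide (j < i ∧ PySem.Int.mod i j = 0)) := by
  rw [PySem.List.pyRange_one_append 2 i tall h2i (le_of_lt hit), List.filter_append,
    List.filter_append, List.filter_filter, List.filter_filter]
  have h2 : List.filter
      (fun a => decide (a < i ∧ PySem.Int.mod i a = 0) && decide (PySem.Int.mod tall a = 0))
      (PySem.List.pyRange i tall 1) = [] := by
    rw [List.filter_eq_nil_iff]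
    intro j hj
    have hji := (PySem.List.mem_pyRange_one.mp hj).1
    have hn : ¬ (j < i ∧ PySem.Int.mod i j = 0) := fun h => absurd h.1 (by omega)
    simp [hn]
  rw [h2, List.append_nil]
  apply List.filter_congr
  intro j hj
  have hb := PySem.List.mem_pyRange_one.mp hj
  have hdvd_i_tall : i ∣ tall := (PySem.Int.mod_eq_zero_iff_dvd tall i).mp hmod
  by_cases hij : PySem.Int.mod i j = 0
  · have hdvd : j ∣ i := (PySem.Int.mod_eq_zero_iff_dvd i j).mp hij
    have htj : PySem.Int.mod tall j = 0 :=
      (PySem.Int.mod_eq_zero_iff_dvd tall j).mpr (hdvd.trans hdvd_i_tall)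
    simp [hij, hb.2, htj]
  · simp [hij]

-- ===== VERDICT (by name: the statement is the Claim_ definition above) =====
theorem primtall_spec : Claim_equal_primtall := by
  intro tall _
  unfold Spec_primtall primtall primtall_alt
  rw [PySem.List.foldl_congr_mem _ _
      (fun acc i => if PySem.Int.mod tall i = 0 then
        acc ++ ((PySem.List.pyRange 2 tall 1).filter
          (fun i => decide (PySem.Int.mod tall i = 0))).filter
            (fun j => decide (j < i ∧ PySem.Int.mod i j = 0))
        else acc) _ ?_]
  · have hbody : ∀ (acc : List Int), ∀ i ∈ (PySem.List.pyRange 2 tall 1),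
        (if PySem.Int.mod tall i = 0 then
          acc ++ ((PySem.List.pyRange 2 tall 1).filter
            (fun i => decide (PySem.Int.mod tall i = 0))).filter
              (fun j => decide (j < i ∧ PySem.Int.mod i j = 0))
          else acc)
        = acc ++ (if PySem.Int.mod tall i = 0 then
            ((PySem.List.pyRange 2 tall 1).filter
              (fun i => decide (PySem.Int.mod tall i = 0))).filter
                (fun j => decide (j < i ∧ PySem.Int.mod i j = 0)) else []) := by
      intro acc i _
      split_ifs <;> simp
    rw [PySem.List.foldl_congr_mem _ _ _ _ hbody,
      PySem.List.foldl_append_eq_flatMap, PySem.List.foldl_append_eq_flatMap,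
      pv_flatMap_ite]
  · intro acc i hi
    have hb := PySem.List.mem_pyRange_one.mp hi
    split_ifs with h
    · rw [PySem.List.foldl_append_ite_eq_filter, pv_inner_eq tall i hb.1 hb.2 h]
      simp [h]
    · simp [h]
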